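-- pv_equiv track=rewrite | github.com/foxxpy/Algorithmie | 035. Recréer la méthode join()/pjoin.py | pjoin
-- ===== SOURCE A (Python) =====
-- def pjoin(char, liste):
--     """Méthode join() des chaînes de caractères recodée en Python"""
--     final_string = str()
--     length_char = len(char)
--     for element in liste:
--         final_string = final_string + element + char
--
--     if length_char == 0:
--         return final_string
--     else:
--         return final_string[:-length_char]
-- ===== SOURCE B (Python) =====
-- def pjoin(char, liste):
--     """Méthode join() recodée: premier élément tel quel, puis séparateur inséré devant chaque suivant."""
--     it = iter(liste)
--     try:
--         result = next(it)
--     except StopIteration: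
--         return ''
--     for element in it:
--         result = result + char + element
--     return result
-- ===== Notes on version B (the rewrite author's own statement) =====
-- stated objective: idiomatic
-- what changed: B takes the first element from an iterator and inserts the separator only between elements, never building A's trailing separator and never slicing it off (no length_char, no branch, no slice).
import Mathlib
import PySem

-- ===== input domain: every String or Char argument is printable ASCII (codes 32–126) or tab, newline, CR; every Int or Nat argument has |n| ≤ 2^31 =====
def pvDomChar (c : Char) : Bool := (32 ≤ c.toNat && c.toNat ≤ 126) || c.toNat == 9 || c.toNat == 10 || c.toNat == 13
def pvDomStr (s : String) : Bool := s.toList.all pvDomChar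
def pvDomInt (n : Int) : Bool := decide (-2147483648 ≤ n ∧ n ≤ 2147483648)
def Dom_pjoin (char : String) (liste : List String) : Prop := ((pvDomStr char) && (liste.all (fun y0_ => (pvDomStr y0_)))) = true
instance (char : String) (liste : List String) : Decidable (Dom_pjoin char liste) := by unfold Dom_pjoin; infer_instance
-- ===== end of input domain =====

-- B inserts the separator only BETWEEN elements (first element taken as the seed, separator
-- prepended to each later element), so it never builds A's trailing separator and never slices
-- it off: no length_char, no final branch (objective: idiomatic).

-- ===== PORT A =====
-- literal transliteration of A: append element + char each iteration, then drop the trailing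
-- separator with final_string[:-length_char] (or return as-is when length_char == 0).
def pjoin (char : String) (liste : List String) : String :=
  let final_string : String := ""
  let length_char : Int := PySem.Str.len char
  let final_string := liste.foldl (fun acc element => acc ++ element ++ char) final_string
  if length_char == 0 then final_string
  else PySem.Str.slice final_string none (some (-length_char))

-- ===== PORT B =====
-- literal transliteration of B: empty list → "", else the first element seeds the accumulator
-- and the loop over the remaining elements appends char ++ element.
def pjoin_alt (char : String) (liste : List String) : String :=
  match liste with
  | [] => ""
  | x :: xs => xs.foldl (fun result element => result ++ char ++ element) x

-- ===== PRECONDITION & SPEC =====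
def Spec_pjoin (char : String) (liste : List String) (out : String) : Prop := out = pjoin_alt char liste
instance (char : String) (liste : List String) (out : String) : Decidable (Spec_pjoin char liste out) := by unfold Spec_pjoin; infer_instance

-- ===== CLAIM (what is proved, stated in full; the proofs are below) =====
def Claim_equal_pjoin : Prop := ∀ (char : String) (liste : List String), Dom_pjoin char liste → Spec_pjoin char liste (pjoin char liste)

-- ===== LEMMAS AND PROOFS =====

-- the A-side fold, moved to List Char
lemma foldA_toList (char : String) : ∀ (xs : List String) (acc : String),
    (xs.foldl (fun a e => a ++ e ++ char) acc).toList
      = xs.foldl (fun a e => a ++ e.toList ++ char.toList) acc.toList := by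
  intro xs
  induction xs with
  | nil => intro acc; simp
  | cons x xs ih => intro acc; simp [List.foldl, ih]

-- the B-side fold, moved to List Char
lemma foldB_toList (char : String) : ∀ (xs : List String) (acc : String),
    (xs.foldl (fun a e => a ++ char ++ e) acc).toList
      = xs.foldl (fun a e => a ++ char.toList ++ e.toList) acc.toList := by
  intro xs
  induction xs with
  | nil => intro acc; simp
  | cons x xs ih => intro acc; simp [List.foldl, ih]

-- pulling the accumulator out of an append-to-the-right fold (A shape)
lemma foldA_acc (c : List Char) : ∀ (xs : List String) (acc : List Char),
    xs.foldl (fun a e => a ++ e.toList ++ c) acc = acc ++ xs.foldl (fun a e => a ++ e.toList ++ c) [] := by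
  intro xs
  induction xs with
  | nil => intro acc; simp
  | cons x xs ih =>
      intro acc
      simp only [List.foldl]
      rw [ih (acc ++ x.toList ++ c), ih ([] ++ x.toList ++ c)]
      simp

-- same for the B shape
lemma foldB_acc (c : List Char) : ∀ (xs : List String) (acc : List Char),
    xs.foldl (fun a e => a ++ c ++ e.toList) acc = acc ++ xs.foldl (fun a e => a ++ c ++ e.toList) [] := by
  intro xs
  induction xs with
  | nil => intro acc; simp
  | cons x xs ih =>
      intro acc
      simp only [List.foldl]
      rw [ih (acc ++ c ++ x.toList), ih ([] ++ c ++ x.toList)]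
      simp

-- key identity: B's between-fold followed by one separator equals one separator followed by A's fold
lemma fold_shift (c : List Char) (xs : List String) :
    xs.foldl (fun a e => a ++ c ++ e.toList) [] ++ c
      = c ++ xs.foldl (fun a e => a ++ e.toList ++ c) [] := by
  induction xs with
  | nil => simp
  | cons x xs ih =>
      simp only [List.foldl]
      rw [foldB_acc c xs, foldA_acc c xs]
      simp only [List.nil_append]
      rw [List.append_assoc, ih]
      simp

theorem pjoin_spec : Claim_equal_pjoin := by
  unfold Claim_equal_pjoin Spec_pjoin pjoin pjoin_alt
  intro char liste _
  dsimp only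
  cases liste with
  | nil =>
      -- A folds over nothing and slices ""; B returns "" directly
      simp only [List.foldl]
      by_cases hc : (PySem.Str.len char == 0) = true
      · rw [if_pos hc]
      · rw [if_neg hc]
        apply String.toList_inj.mp
        rw [PySem.Str.toList_slice]
        simp [PySem.List.slice]
  | cons x xs =>
      apply String.toList_inj.mp
      by_cases hc0 : (PySem.Str.len char == 0) = true
      · -- empty separator: A takes its first branch, the two fold shapes coincide
        rw [if_pos hc0]
        have hc : char.toList.length = 0 := by
          simpa [PySem.Str.len_eq] using hc0
        have hnil : char.toList = [] := List.eq_nil_of_length_eq_zero hc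
        rw [foldA_toList char (x :: xs) "", foldB_toList char xs x]
        simp only [List.foldl, String.toList_empty, List.nil_append, hnil, List.append_nil]
      · -- nonempty separator: A slices off the trailing copy of the separator
        rw [if_neg hc0]
        set c := char.toList with hc_def
        have hc : c.length ≠ 0 := by
          simp [PySem.Str.len_eq, ← hc_def] at hc0
          simpa using fun h => hc0 (by simp [h])
        rw [PySem.Str.toList_slice]
        simp only [PySem.Chars.slice_eq_listSlice, PySem.Str.len_eq, ← hc_def]
        rw [PySem.List.slice_to_neg_natCast _ _ (Nat.pos_of_ne_zero hc)]
        rw [foldA_toList char (x :: xs) "", foldB_toList char xs x]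
        simp only [List.foldl, String.toList_empty, List.nil_append, ← hc_def]
        rw [foldA_acc c xs (x.toList ++ c), foldB_acc c xs x.toList]
        -- A's fold = x ++ c ++ FA = (x ++ FB) ++ c  by fold_shift; take (len - |c|) leaves x ++ FB
        have hshift : (x.toList ++ c) ++ xs.foldl (fun a e => a ++ e.toList ++ c) []
            = (x.toList ++ xs.foldl (fun a e => a ++ c ++ e.toList) []) ++ c := by
          rw [List.append_assoc, ← fold_shift c xs]
          simp
        rw [hshift]
        have hlen : ((x.toList ++ xs.foldl (fun a e => a ++ c ++ e.toList) []) ++ c).length - c.length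
            = (x.toList ++ xs.foldl (fun a e => a ++ c ++ e.toList) []).length := by
          simp
          omega
        rw [hlen]
        exact List.take_left
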